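-- pv_equiv track=rewrite | github.com/SomedudeX/mpeg-convert | src/mpeg_convert/options.py | _parse_custom_command
-- ===== SOURCE A (Python) =====
-- def _parse_custom_command(_commands: str) -> dict:
--     """Parses the optional commands that the user enters into ffmpeg
--
--     + Args -
--         Commands: a string of commands that the user enters
--
--     + Returns -
--         Dictionary: a dictionary containing the options (keys) and the user's
--         value (values)
--
--     + Notes -
--         This method is not extensively tested and is not guaranteed to work
--         in all scenarios. Exercise caution when using the custom commands
--     """
--     _ret: dict = {}
--
--     if _commands == "":
--         return _ret
--
--     _commands += " "
--     _option: str = ""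
--     _value: str = ""
--     _is_option: bool = True
--     _current_str: str = ""
--
--     for _ in range(len(_commands)):
--         if len(_commands) == 0:
--             break
--         if _commands[0] == "-":
--             _commands = _commands[1:]
--             _is_option = True
--             continue
--         if _commands[0] == " " and _is_option == True:
--             _is_option = False
--             _option = _current_str
--             _commands = _commands[1:]
--             _current_str = ""
--             _ret[_option] = None
--             continue
--         if _commands[0] == " " and _is_option == False:
--             _is_option = True
--             _value = _current_str
--             _commands = _commands[1:]
--             _current_str = ""
--             _ret[_option] = _value
--             continue
--
--         _current_str += _commands[0]
--         _commands = _commands[1:]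
--         continue
--
--     return _ret
-- ===== SOURCE B (Python) =====
-- def _parse_custom_command(_commands: str) -> dict:
--     """Single linear pass over the characters (no repeated slicing)."""
--     ret: dict = {}
--     if _commands == "":
--         return ret
--     option = ""
--     current = ""
--     is_option = True
--     for ch in _commands + " ":
--         if ch == "-":
--             is_option = True
--         elif ch == " ":
--             if is_option:
--                 is_option = False
--                 option = current
--                 ret[option] = None
--             else:
--                 is_option = True
--                 ret[option] = current
--             current = ""
--         else:
--             current += ch
--     return ret
-- ===== Notes on version B (the rewrite author's own statement) =====
-- stated objective: faster
-- what changed: Replaces the fuel-counted loop that re-slices the remaining command string on every step with a single linear for-loop over the characters using the same option/value state machine.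
import Mathlib
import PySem

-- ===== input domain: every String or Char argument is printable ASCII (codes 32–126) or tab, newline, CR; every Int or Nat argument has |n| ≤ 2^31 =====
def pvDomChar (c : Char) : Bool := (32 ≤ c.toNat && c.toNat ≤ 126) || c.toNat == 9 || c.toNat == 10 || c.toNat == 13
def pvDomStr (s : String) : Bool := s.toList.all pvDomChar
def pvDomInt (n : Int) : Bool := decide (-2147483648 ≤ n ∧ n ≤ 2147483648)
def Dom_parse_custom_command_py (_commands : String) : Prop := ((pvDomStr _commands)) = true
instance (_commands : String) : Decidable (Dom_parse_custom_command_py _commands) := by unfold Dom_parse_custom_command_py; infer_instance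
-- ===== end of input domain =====

-- B replaces A's quadratic re-slicing loop with one linear pass over the characters (same state machine).


-- ===== PORT A =====
-- A's for-loop: fuel = len(_commands + " "); each iteration looks at the head
-- character and slices it off; state (_option, _value, _is_option, _current_str, _ret).
def pvALoop (fuel : Nat) (cmds : List Char) (opt val : String) (isOpt : Bool)
    (cur : String) (ret : PySem.Dict String (Option String)) :
    PySem.Dict String (Option String) :=
  match fuel with
  | 0 => ret
  | fuel + 1 =>
    match cmds with
    | [] => ret
    | c :: rest =>
      if c = '-' then
        pvALoop fuel rest opt val true cur ret
      else if c = ' ' ∧ isOpt = true then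
        pvALoop fuel rest cur val false "" (ret.insert cur none)
      else if c = ' ' ∧ isOpt = false then
        pvALoop fuel rest opt cur true "" (ret.insert opt (some cur))
      else
        pvALoop fuel rest opt val isOpt (cur.push c) ret

def parse_custom_command_py (_commands : String) : List (String × Option String) :=
  if _commands = "" then []
  else
    let cs := _commands.toList ++ [' ']   -- _commands += " "
    (pvALoop cs.length cs "" "" true "" PySem.Dict.empty).items

-- ===== PORT B =====
-- B's single pass: fold the same state machine over the characters.
def pvBStep (st : PySem.Dict String (Option String) × String × Bool × String) (c : Char) :
    PySem.Dict String (Option String) × String × Bool × String :=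
  let (ret, opt, isOpt, cur) := st
  if c = '-' then (ret, opt, true, cur)
  else if c = ' ' then
    if isOpt then (ret.insert cur none, cur, false, "")
    else (ret.insert opt (some cur), opt, true, "")
  else (ret, opt, isOpt, cur.push c)

def parse_custom_command_py_alt (_commands : String) : List (String × Option String) :=
  if _commands = "" then []
  else
    ((_commands.toList ++ [' ']).foldl pvBStep (PySem.Dict.empty, "", true, "")).1.items

-- ===== PRECONDITION & SPEC =====
def Spec_parse_custom_command_py (_commands : String) (out : List (String × Option String)) : Prop := out = parse_custom_command_py_alt _commands
instance (_commands : String) (out : List (String × Option String)) : Decidable (Spec_parse_custom_command_py _commands out) := by unfold Spec_parse_custom_command_py; infer_instance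

-- ===== CLAIM (what is proved, stated in full; the proofs are below) =====
def Claim_equal_parse_custom_command_py : Prop := ∀ (_commands : String), Dom_parse_custom_command_py _commands → Spec_parse_custom_command_py _commands (parse_custom_command_py _commands)

-- ===== LEMMAS AND PROOFS =====

-- A's loop with fuel = remaining length equals B's fold: each iteration of A
-- consumes exactly one character, so the fuel never runs out early.
theorem pvALoop_eq_foldl (cs : List Char) :
    ∀ (opt val : String) (isOpt : Bool) (cur : String)
      (ret : PySem.Dict String (Option String)),
      pvALoop cs.length cs opt val isOpt cur ret =
        (cs.foldl pvBStep (ret, opt, isOpt, cur)).1 := by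
  induction cs with
  | nil => intro opt val isOpt cur ret; rfl
  | cons c rest ih =>
    intro opt val isOpt cur ret
    simp only [List.length_cons, pvALoop, List.foldl_cons, pvBStep]
    by_cases hd : c = '-'
    · simp [hd, ih]
    · by_cases hs : c = ' '
      · cases isOpt <;> simp [hs, ih]
      · cases isOpt <;> simp [hd, hs, ih]

-- ===== VERDICT (by name: the statement is the Claim_ definition above) =====
theorem parse_custom_command_py_spec : Claim_equal_parse_custom_command_py := by
  intro s _
  unfold Spec_parse_custom_command_py parse_custom_command_py parse_custom_command_py_alt
  by_cases h : s = ""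
  · simp [h]
  · simp only [h, if_false]
    rw [pvALoop_eq_foldl]
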